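-- pv_equiv track=rewrite | github.com/RodrigoParodi/Desafio_Stark_lab_1 | Desafio Stark 01/Funciones_stark.py | buscar_maximo
-- ===== SOURCE A (Python) =====
-- def buscar_maximo(lista:list,clave:str):
--     """Busca un valor maximo dentro de la lista
--
--     Args:
--         lista (list): lista donde se realizara la busqueda
--         clave (str): campo del diccionario donde buscaremos el valor maximo que queremos
--
--     Raises:
--         ValueError: Si la lista esta vacia lanzara una excepcion
--
--     Returns:
--         _type_: retorna el valor maximo
--     """
--     bandera = False
--     if len(lista) > 0:
--         for dato in lista:
--             if bandera == False or dato[clave] > valor_maximo: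
--                 valor_maximo = dato[clave]
--                 bandera = True
--     else:
--         raise ValueError("Lista Vacia!!!")
--     return valor_maximo
-- ===== SOURCE B (Python) =====
-- def buscar_maximo(lista: list, clave: str):
--     if len(lista) == 0:
--         raise ValueError("Lista Vacia!!!")
--     valores = [dato[clave] for dato in lista]
--     valores.sort()
--     return valores[-1]
-- ===== Notes on version B (the rewrite author's own statement) =====
-- stated objective: alternative
-- what changed: Replaces the flag-and-running-maximum scan with extracting the key's values, sorting them, and returning the last element.
import Mathlib
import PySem

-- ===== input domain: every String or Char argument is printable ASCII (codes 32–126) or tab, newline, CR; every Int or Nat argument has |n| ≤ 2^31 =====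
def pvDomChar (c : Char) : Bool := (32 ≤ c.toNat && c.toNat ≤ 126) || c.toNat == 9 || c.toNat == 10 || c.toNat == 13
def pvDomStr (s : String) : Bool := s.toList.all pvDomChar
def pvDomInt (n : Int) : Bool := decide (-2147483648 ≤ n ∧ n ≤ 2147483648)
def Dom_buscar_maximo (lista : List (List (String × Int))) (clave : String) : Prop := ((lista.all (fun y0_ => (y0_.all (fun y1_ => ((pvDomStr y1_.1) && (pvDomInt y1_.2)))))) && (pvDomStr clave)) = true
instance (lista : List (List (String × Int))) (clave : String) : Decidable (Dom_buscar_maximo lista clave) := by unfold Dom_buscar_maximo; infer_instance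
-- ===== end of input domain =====

-- B replaces A's flag-and-running-maximum scan with collect-values / sort / take-last (alternative decomposition, same result on nonempty lists whose dicts all contain the key).

-- ===== PORT A =====
-- A's loop keeps (bandera, valor_maximo); dato[clave] is a dict lookup (first match),
-- total here because Pre_ guarantees the key is present (Python raises KeyError otherwise).
def buscar_maximo (lista : List (List (String × Int))) (clave : String) : Int :=
  if lista.length > 0 then
    (lista.foldl (fun (st : Bool × Int) dato =>
      if st.1 = false ∨ (PySem.Dict.mk dato).getD clave 0 > st.2
      then (true, (PySem.Dict.mk dato).getD clave 0) else st) (false, 0)).2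
  else 0  -- Python raises ValueError("Lista Vacia!!!") here; excluded by Pre_

-- ===== PORT B =====
def buscar_maximo_alt (lista : List (List (String × Int))) (clave : String) : Int :=
  if lista.length = 0 then 0  -- Python raises ValueError("Lista Vacia!!!") here; excluded by Pre_
  else
    let valores := lista.map (fun dato => (PySem.Dict.mk dato).getD clave 0)
    let s := PySem.List.sorted valores (fun x => x) false
    PySem.List.pyGetD s (-1) 0

-- ===== PRECONDITION & SPEC =====
-- Pre_ excludes exactly the inputs where the Python A raises: the empty list (ValueError)
-- and lists with a dict missing the key clave (KeyError).
def Pre_buscar_maximo (lista : List (List (String × Int))) (clave : String) : Prop :=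
  lista ≠ [] ∧ ∀ dato ∈ lista, (PySem.Dict.mk dato).contains clave = true
instance (lista : List (List (String × Int))) (clave : String) : Decidable (Pre_buscar_maximo lista clave) := by unfold Pre_buscar_maximo; infer_instance

def pvWitness_buscar_maximo : (List (List (String × Int))) × String :=
  ([[("hp", 3), ("edad", 20)], [("hp", 7)]], "hp")

def Spec_buscar_maximo (lista : List (List (String × Int))) (clave : String) (out : Int) : Prop := out = buscar_maximo_alt lista clave
instance (lista : List (List (String × Int))) (clave : String) (out : Int) : Decidable (Spec_buscar_maximo lista clave out) := by unfold Spec_buscar_maximo; infer_instance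

-- ===== CLAIM (what is proved, stated in full; the proofs are below) =====
def Claim_equal_buscar_maximo : Prop := ∀ (lista : List (List (String × Int))) (clave : String), Dom_buscar_maximo lista clave → Pre_buscar_maximo lista clave → Spec_buscar_maximo lista clave (buscar_maximo lista clave)

-- ===== LEMMAS AND PROOFS =====

-- A's loop body once bandera is true is just a running max over the key's values.
theorem foldA_true (vs : List (List (String × Int))) (clave : String) (a : Int) :
    vs.foldl (fun (st : Bool × Int) dato =>
      if st.1 = false ∨ (PySem.Dict.mk dato).getD clave 0 > st.2
      then (true, (PySem.Dict.mk dato).getD clave 0) else st) (true, a)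
    = (true, (vs.map (fun dato => (PySem.Dict.mk dato).getD clave 0)).foldl max a) := by
  induction vs generalizing a with
  | nil => rfl
  | cons d t ih =>
    simp only [List.foldl, List.map]
    by_cases h : (PySem.Dict.mk d).getD clave 0 > a
    · rw [if_pos (Or.inr h), ih]
      congr 2
      omega
    · rw [if_neg (by simp [h]), ih]
      congr 2
      omega

theorem foldl_max_mem (l : List Int) (a : Int) : l.foldl max a ∈ a :: l := by
  induction l generalizing a with
  | nil => simp [List.foldl]
  | cons x t ih =>
    rw [List.foldl_cons]
    rcases List.mem_cons.1 (ih (max a x)) with h1 | h1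
    · rcases max_choice a x with hm | hm
      · rw [h1, hm]; exact List.mem_cons_self
      · rw [h1, hm]; exact List.mem_cons_of_mem _ List.mem_cons_self
    · exact List.mem_cons_of_mem _ (List.mem_cons_of_mem _ h1)

theorem le_foldl_max (l : List Int) (a : Int) : ∀ x ∈ a :: l, x ≤ l.foldl max a := by
  induction l generalizing a with
  | nil => simp [List.foldl]
  | cons y t ih =>
    intro x hx
    rw [List.foldl_cons]
    rcases List.mem_cons.1 hx with rfl | h
    · exact le_trans (le_max_left x y) (ih (max x y) _ List.mem_cons_self)
    · rcases List.mem_cons.1 h with rfl | h2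
      · exact le_trans (le_max_right a x) (ih (max a x) _ List.mem_cons_self)
      · exact ih (max a y) x (List.mem_cons_of_mem _ h2)

theorem pairwise_le_getLast (s : List Int) (hp : s.Pairwise (· ≤ ·)) (hne : s ≠ []) :
    ∀ x ∈ s, x ≤ s.getLast hne := by
  induction s with
  | nil => simp at hne
  | cons a t ih =>
    rw [List.pairwise_cons] at hp
    intro x hx
    cases t with
    | nil =>
      rcases List.mem_cons.1 hx with h | h
      · simp [h, List.getLast]
      · simp at h
    | cons b u =>
      rw [List.getLast_cons (List.cons_ne_nil b u)]
      rcases List.mem_cons.1 hx with h | h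
      · exact h ▸ hp.1 _ (List.getLast_mem _)
      · exact ih hp.2 (List.cons_ne_nil b u) x h

-- ===== VERDICT (by name: the statement is the Claim_ definition above) =====
theorem buscar_maximo_spec : Claim_equal_buscar_maximo := by
  intro lista clave _ hpre
  obtain ⟨hne, _⟩ := hpre
  unfold Spec_buscar_maximo buscar_maximo buscar_maximo_alt
  cases lista with
  | nil => exact absurd rfl hne
  | cons d t =>
    simp only [List.length_cons, if_neg (by omega : ¬ (t.length + 1 = 0)),
      if_pos (by omega : t.length + 1 > 0)]
    -- A's side: first iteration sets (true, v0), rest is a running max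
    have hstep : (if ((false, (0:Int)).1 = false ∨ (PySem.Dict.mk d).getD clave 0 > ((false, (0:Int)) : Bool × Int).2)
        then (true, (PySem.Dict.mk d).getD clave 0) else ((false, 0) : Bool × Int))
        = (true, (PySem.Dict.mk d).getD clave 0) := by
      rw [if_pos (Or.inl rfl)]
    rw [List.foldl_cons, hstep, foldA_true]
    -- B's side
    rw [List.map_cons]
    set v0 := (PySem.Dict.mk d).getD clave 0 with hv0
    set vs := t.map (fun dato => (PySem.Dict.mk dato).getD clave 0) with hvs
    have hsne : PySem.List.sorted (v0 :: vs) (fun x => x) false ≠ [] := by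
      rw [Ne, PySem.List.sorted_eq_nil_iff]; simp
    rw [PySem.List.pyGetD_neg_one _ _ hsne]
    -- the sorted list's last element is the running max
    set s := PySem.List.sorted (v0 :: vs) (fun x => x) false with hs
    have hperm : s.Perm (v0 :: vs) := PySem.List.sorted_perm _ _ _
    have hpw : s.Pairwise (· ≤ ·) := by
      have := PySem.List.sorted_pairwise (v0 :: vs) (fun x => x)
      simpa using this
    have hMmem : vs.foldl max v0 ∈ s := hperm.mem_iff.2 (foldl_max_mem vs v0)
    have hlast_mem : s.getLast hsne ∈ v0 :: vs := hperm.subset (List.getLast_mem hsne)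
    have h1 : s.getLast hsne ≤ vs.foldl max v0 := le_foldl_max vs v0 _ hlast_mem
    have h2 : vs.foldl max v0 ≤ s.getLast hsne := pairwise_le_getLast s hpw hsne _ hMmem
    exact le_antisymm h2 h1
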